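-- pv_equiv track=rewrite | github.com/posl/comment_recommendation | script/mod_gen/4_time/en/243_D/8.py | find_vertex
-- ===== SOURCE A (Python) =====
-- def find_vertex(n,x,s):
--     v=[x]
--     for i in range(n):
--         if s[i]=='U':
--             v.append(v[i]//2)
--         elif s[i]=='L':
--             v.append(v[i]*2)
--         else:
--             v.append(v[i]*2+1)
--     return v[n]
-- ===== SOURCE B (Python) =====
-- def find_vertex(n, x, s):
--     # First pass: reduce the moves to an equivalent stack of "effective" moves,
--     # cancelling a 'U' against an immediately preceding L/R (exact: (2v)//2 == (2v+1)//2 == v).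
--     eff = []
--     for i in range(n):
--         c = s[i]
--         if c == 'U' and eff and eff[-1] != 'U':
--             eff.pop()
--         else:
--             eff.append(c if c in ('U', 'L') else 'R')
--     # Second pass: apply the reduced moves.
--     v = x
--     for c in eff:
--         if c == 'U':
--             v //= 2
--         elif c == 'L':
--             v *= 2
--         else:
--             v = v * 2 + 1
--     return v
-- ===== Notes on version B (the rewrite author's own statement) =====
-- stated objective: faster
-- what changed: Replaces A's single loop that materialises the whole O(n) trajectory list with a reduce-then-apply scheme: one pass builds a stack of effective moves (a 'U' cancels an immediately preceding L/R exactly, since (2v)//2 == (2v+1)//2 == v), a second pass applies the reduced moves to x; cancelled moves are never applied to the (potentially huge) integer.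
import Mathlib
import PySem

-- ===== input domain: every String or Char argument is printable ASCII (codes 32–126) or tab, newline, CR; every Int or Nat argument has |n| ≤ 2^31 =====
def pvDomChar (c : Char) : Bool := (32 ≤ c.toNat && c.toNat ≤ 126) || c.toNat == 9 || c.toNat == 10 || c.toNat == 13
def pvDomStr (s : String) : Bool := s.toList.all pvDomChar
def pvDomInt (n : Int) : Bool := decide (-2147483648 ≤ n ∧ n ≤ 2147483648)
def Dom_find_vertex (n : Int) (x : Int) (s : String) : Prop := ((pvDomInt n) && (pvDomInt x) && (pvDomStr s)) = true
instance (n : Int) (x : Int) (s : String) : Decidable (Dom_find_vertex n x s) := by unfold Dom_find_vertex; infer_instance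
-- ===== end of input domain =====

-- B replaces A's trajectory-list loop with a reduce-then-apply scheme: a stack of effective
-- moves ('U' cancels an immediately preceding L/R exactly) is built first, then applied to x.

-- ===== PORT A =====
def find_vertex (n : Int) (x : Int) (s : String) : Int :=
  let v := (PySem.List.pyRange 0 n 1).foldl (fun v i =>
    let c := (PySem.Str.pyGet? s i).getD ' '
    let vi := (PySem.List.pyGet? v i).getD 0
    v ++ [if c = 'U' then PySem.Int.floordiv vi 2
          else if c = 'L' then vi * 2
          else vi * 2 + 1]) [x]
  (PySem.List.pyGet? v n).getD 0

-- ===== PORT B =====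
def find_vertex_alt (n : Int) (x : Int) (s : String) : Int :=
  let eff := (PySem.List.pyRange 0 n 1).foldl (fun eff i =>
    let c := (PySem.Str.pyGet? s i).getD ' '
    if c = 'U' ∧ eff ≠ [] ∧ eff.getLast? ≠ some 'U' then eff.dropLast
    else eff ++ [if c = 'U' ∨ c = 'L' then c else 'R']) []
  eff.foldl (fun v c =>
    if c = 'U' then PySem.Int.floordiv v 2
    else if c = 'L' then v * 2
    else v * 2 + 1) x

-- ===== PRECONDITION & SPEC =====
-- Pre_ excludes exactly the inputs where A raises IndexError: n > len(s) (s[i] out of range)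
-- and n < -1 (v[n] out of range; at n = -1 A returns v[-1] = x and so does B).
def Pre_find_vertex (n : Int) (x : Int) (s : String) : Prop :=
  -1 ≤ n ∧ n ≤ (s.toList.length : Int)
instance (n : Int) (x : Int) (s : String) : Decidable (Pre_find_vertex n x s) := by
  unfold Pre_find_vertex; infer_instance
def pvWitness_find_vertex : Int × Int × String := (2, 5, "LU")

def Spec_find_vertex (n : Int) (x : Int) (s : String) (out : Int) : Prop := out = find_vertex_alt n x s
instance (n : Int) (x : Int) (s : String) (out : Int) : Decidable (Spec_find_vertex n x s out) := by unfold Spec_find_vertex; infer_instance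

-- ===== CLAIM (what is proved, stated in full; the proofs are below) =====
def Claim_equal_find_vertex : Prop := ∀ (n : Int) (x : Int) (s : String), Dom_find_vertex n x s → Pre_find_vertex n x s → Spec_find_vertex n x s (find_vertex n x s)

-- ===== LEMMAS AND PROOFS =====

-- one move applied to the current vertex
def pvStep (c : Char) (v : Int) : Int :=
  if c = 'U' then PySem.Int.floordiv v 2 else if c = 'L' then v * 2 else v * 2 + 1

-- a move list applied left to right
def pvRun (p : List Char) (x : Int) : Int := p.foldl (fun v c => pvStep c v) x

-- one step of B's stack reduction
def pvRed (eff : List Char) (c : Char) : List Char :=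
  if c = 'U' ∧ eff ≠ [] ∧ eff.getLast? ≠ some 'U' then eff.dropLast
  else eff ++ [if c = 'U' ∨ c = 'L' then c else 'R']

def pvReduce (p : List Char) : List Char := p.foldl pvRed []

lemma pvRun_append (p : List Char) (c : Char) (x : Int) :
    pvRun (p ++ [c]) x = pvStep c (pvRun p x) := by
  simp [pvRun, List.foldl_append]

-- the reduced stack contains only U/L/R and applies like the original prefix
lemma pvReduce_correct (p : List Char) :
    (∀ c ∈ pvReduce p, c = 'U' ∨ c = 'L' ∨ c = 'R') ∧
    (∀ x : Int, pvRun (pvReduce p) x = pvRun p x) := by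
  induction p using List.reverseRecOn with
  | nil => exact ⟨by simp [pvReduce], by intro x; rfl⟩
  | append_singleton p c ih =>
    have hred : pvReduce (p ++ [c]) = pvRed (pvReduce p) c := by
      simp [pvReduce, List.foldl_append]
    rcases ih with ⟨hmem, hrun⟩
    by_cases hcond : c = 'U' ∧ pvReduce p ≠ [] ∧ (pvReduce p).getLast? ≠ some 'U'
    · -- pop case
      rcases hcond with ⟨hc, hne, hlast⟩
      have hdecomp : pvReduce p = (pvReduce p).dropLast ++ [(pvReduce p).getLast hne] :=
        (List.dropLast_append_getLast hne).symm
      have hd : (pvReduce p).getLast hne = 'L' ∨ (pvReduce p).getLast hne = 'R' := by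
        have h1 := hmem _ (List.getLast_mem hne)
        have h2 : (pvReduce p).getLast? = some ((pvReduce p).getLast hne) :=
          List.getLast?_eq_getLast hne
        rcases h1 with h | h | h
        · exact absurd (h2.trans (by rw [h])) hlast
        · exact Or.inl h
        · exact Or.inr h
      constructor
      · intro d hdmem
        rw [hred, pvRed, if_pos ⟨hc, hne, hlast⟩] at hdmem
        exact hmem d (List.dropLast_subset _ hdmem)
      · intro x
        rw [hred, pvRed, if_pos ⟨hc, hne, hlast⟩, pvRun_append, hc]
        have hrp : pvRun p x = pvStep ((pvReduce p).getLast hne) (pvRun (pvReduce p).dropLast x) := by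
          conv_lhs => rw [← hrun x, hdecomp]
          rw [pvRun_append]
        rw [hrp]
        rcases hd with h | h <;> simp [pvStep, h] <;> omega
    · -- push case
      have hredeq : pvReduce (p ++ [c]) =
          pvReduce p ++ [if c = 'U' ∨ c = 'L' then c else 'R'] := by
        rw [hred, pvRed, if_neg hcond]
      constructor
      · intro d hdmem
        rw [hredeq] at hdmem
        rcases List.mem_append.mp hdmem with h | h
        · exact hmem d h
        · simp only [List.mem_singleton] at h
          subst h
          by_cases hU : c = 'U' ∨ c = 'L'
          · rw [if_pos hU]; rcases hU with h | h
            · exact Or.inl h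
            · exact Or.inr (Or.inl h)
          · rw [if_neg hU]; exact Or.inr (Or.inr rfl)
      · intro x
        rw [hredeq, pvRun_append, pvRun_append, hrun]
        by_cases hU : c = 'U' ∨ c = 'L'
        · rw [if_pos hU]
        · rw [if_neg hU]
          push_neg at hU
          simp [pvStep, hU.1, hU.2]

-- A's loop state after m iterations is the full trajectory of the first m moves
lemma pvA_loop (s : String) (x : Int) (m : Nat) (hm : m ≤ s.toList.length) :
    (PySem.List.pyRange 0 (m : Int) 1).foldl (fun v i =>
      let c := (PySem.Str.pyGet? s i).getD ' '
      let vi := (PySem.List.pyGet? v i).getD 0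
      v ++ [if c = 'U' then PySem.Int.floordiv vi 2
            else if c = 'L' then vi * 2
            else vi * 2 + 1]) [x]
    = (List.range (m + 1)).map (fun j => pvRun (s.toList.take j) x) := by
  induction m with
  | zero =>
    rw [PySem.List.pyRange_one_eq_nil (by norm_num)]
    simp [pvRun]
  | succ m ih =>
    have hm' : m ≤ s.toList.length := Nat.le_of_succ_le hm
    have hcast : ((m + 1 : Nat) : Int) = (m : Int) + 1 := by push_cast; ring
    rw [hcast, PySem.List.pyRange_one_succ_right (by positivity), List.foldl_append,
      ih hm']
    simp only [List.foldl_cons, List.foldl_nil]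
    have hc : (PySem.Str.pyGet? s (m : Int)).getD ' ' = s.toList[m] := by
      rw [PySem.Str.pyGet?_natCast, List.getElem?_eq_getElem (by omega)]
      rfl
    have hv : (PySem.List.pyGet? ((List.range (m + 1)).map
        (fun j => pvRun (s.toList.take j) x)) (m : Int)).getD 0
        = pvRun (s.toList.take m) x := by
      rw [PySem.List.pyGet?_natCast, List.getElem?_eq_getElem (by simp)]
      simp
    rw [hc, hv]
    rw [List.range_succ (n := m + 1), List.map_append]
    congr 1
    simp only [List.map_cons, List.map_nil]
    congr 1
    have htake : s.toList.take (m + 1) = s.toList.take m ++ [s.toList[m]] := by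
      rw [List.take_succ, List.getElem?_eq_getElem (by omega)]
      rfl
    rw [htake, pvRun_append]
    rfl

-- B's first loop after m iterations is the reduction of the first m moves
lemma pvB_loop (s : String) (m : Nat) (hm : m ≤ s.toList.length) :
    (PySem.List.pyRange 0 (m : Int) 1).foldl (fun eff i =>
      let c := (PySem.Str.pyGet? s i).getD ' '
      if c = 'U' ∧ eff ≠ [] ∧ eff.getLast? ≠ some 'U' then eff.dropLast
      else eff ++ [if c = 'U' ∨ c = 'L' then c else 'R']) []
    = pvReduce (s.toList.take m) := by
  induction m with
  | zero =>
    rw [PySem.List.pyRange_one_eq_nil (by norm_num)]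
    simp [pvReduce]
  | succ m ih =>
    have hm' : m ≤ s.toList.length := Nat.le_of_succ_le hm
    have hcast : ((m + 1 : Nat) : Int) = (m : Int) + 1 := by push_cast; ring
    rw [hcast, PySem.List.pyRange_one_succ_right (by positivity), List.foldl_append,
      ih hm']
    simp only [List.foldl_cons, List.foldl_nil]
    have hc : (PySem.Str.pyGet? s (m : Int)).getD ' ' = s.toList[m] := by
      rw [PySem.Str.pyGet?_natCast, List.getElem?_eq_getElem (by omega)]
      rfl
    have htake : s.toList.take (m + 1) = s.toList.take m ++ [s.toList[m]] := by
      rw [List.take_succ, List.getElem?_eq_getElem (by omega)]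
      rfl
    rw [hc, htake]
    simp only [pvReduce, List.foldl_append, List.foldl_cons, List.foldl_nil, pvRed]

-- ===== VERDICT (by name: the statement is the Claim_ definition above) =====
theorem find_vertex_spec : Claim_equal_find_vertex := by
  intro n x s _ hpre
  rcases hpre with ⟨hlo, hhi⟩
  unfold Spec_find_vertex
  by_cases hneg : n = -1
  · subst hneg
    rw [find_vertex, find_vertex_alt, PySem.List.pyRange_one_eq_nil (by norm_num)]
    simp [PySem.List.pyGet?_neg_one]
  · have h0 : 0 ≤ n := by omega
    obtain ⟨m, rfl⟩ : ∃ m : Nat, n = (m : Int) := ⟨n.toNat, (Int.toNat_of_nonneg h0).symm⟩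
    have hm : m ≤ s.toList.length := by exact_mod_cast hhi
    rw [find_vertex, find_vertex_alt]
    simp only []
    rw [pvA_loop s x m hm, pvB_loop s m hm]
    have hA : (PySem.List.pyGet? ((List.range (m + 1)).map
        (fun j => pvRun (s.toList.take j) x)) (m : Int)).getD 0
        = pvRun (s.toList.take m) x := by
      rw [PySem.List.pyGet?_natCast, List.getElem?_eq_getElem (by simp)]
      simp
    rw [hA]
    have hB := (pvReduce_correct (s.toList.take m)).2 x
    calc pvRun (s.toList.take m) x
        = pvRun (pvReduce (s.toList.take m)) x := (hB).symm
      _ = (pvReduce (s.toList.take m)).foldl (fun v c =>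
            if c = 'U' then PySem.Int.floordiv v 2
            else if c = 'L' then v * 2
            else v * 2 + 1) x := by rfl
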